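-- pv_equiv track=rewrite | github.com/HouseofTyrell/kometa-preview-studio | renderer/preview_entrypoint.py | sanitize_yaml_text
-- ===== SOURCE A (Python) =====
-- def sanitize_yaml_text(text: str) -> str:
--     lines = text.splitlines()
--     last_non_empty = -1
--     for idx in range(len(lines) - 1, -1, -1):
--         if lines[idx].strip():
--             last_non_empty = idx
--             break
--
--     sanitized_lines = []
--     for idx, line in enumerate(lines):
--         if line.strip() == '...' and idx != last_non_empty:
--             continue
--         sanitized_lines.append(line)
--
--     sanitized = '\n'.join(sanitized_lines)
--     if text.endswith('\n'):
--         sanitized += '\n'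
--     return sanitized
-- ===== SOURCE B (Python) =====
-- def sanitize_yaml_text(text: str) -> str:
--     kept = []
--     seen_non_empty = False
--     for line in reversed(text.splitlines()):
--         stripped = line.strip()
--         if not (stripped == '...' and seen_non_empty):
--             kept.append(line)
--         if stripped:
--             seen_non_empty = True
--     kept.reverse()
--     sanitized = '\n'.join(kept)
--     if text.endswith('\n'):
--         sanitized += '\n'
--     return sanitized
-- ===== Notes on version B (the rewrite author's own statement) =====
-- stated objective: simpler
-- what changed: Replaces A's two passes (an index search for the last non-empty line, then a filter keyed on that index) by a single backward traversal carrying a seen_non_empty flag.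
import Mathlib
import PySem

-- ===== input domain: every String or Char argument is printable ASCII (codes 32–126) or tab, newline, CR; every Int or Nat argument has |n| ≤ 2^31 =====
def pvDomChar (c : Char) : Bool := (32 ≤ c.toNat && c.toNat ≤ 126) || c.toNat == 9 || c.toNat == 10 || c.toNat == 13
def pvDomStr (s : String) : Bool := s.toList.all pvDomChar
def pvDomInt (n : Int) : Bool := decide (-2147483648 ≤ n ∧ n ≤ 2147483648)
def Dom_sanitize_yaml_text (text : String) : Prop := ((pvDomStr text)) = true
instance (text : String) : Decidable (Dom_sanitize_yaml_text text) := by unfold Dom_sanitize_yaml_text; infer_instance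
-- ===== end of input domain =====

-- B replaces A's last-non-empty index search plus index-keyed filtering pass by one
-- backward traversal carrying a seen_non_empty flag (objective: simpler decomposition).

-- ===== PORT A =====
-- A's first loop: for idx in range(len(lines)-1,-1,-1): if lines[idx].strip(): last=idx; break
def sytFindLast (lines : List String) : List Int → Int
  | [] => -1
  | idx :: rest =>
      if PySem.Str.strip (PySem.List.pyGetD lines idx "") ≠ "" then idx
      else sytFindLast lines rest

def sanitize_yaml_text (text : String) : String :=
  let lines := PySem.Str.splitlines text
  let last_non_empty : Int :=
    sytFindLast lines (PySem.List.pyRange ((lines.length : Int) - 1) (-1) (-1))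
  let sanitized_lines := (PySem.List.enumerate lines 0).foldl
    (fun acc p =>
      if PySem.Str.strip p.2 == "..." && p.1 != last_non_empty then acc
      else acc ++ [p.2]) []
  let sanitized := PySem.Str.join "\n" sanitized_lines
  if PySem.Str.endswith text "\n" then sanitized ++ "\n" else sanitized

-- ===== PORT B =====
def sanitize_yaml_text_alt (text : String) : String :=
  let lines := PySem.Str.splitlines text
  let st := lines.reverse.foldl
    (fun (st : List String × Bool) line =>
      let stripped := PySem.Str.strip line
      let kept := if !(stripped == "..." && st.2) then st.1 ++ [line] else st.1
      (kept, st.2 || !(stripped == ""))) ([], false)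
  let kept := st.1.reverse
  let sanitized := PySem.Str.join "\n" kept
  if PySem.Str.endswith text "\n" then sanitized ++ "\n" else sanitized

-- ===== PRECONDITION & SPEC =====
def Spec_sanitize_yaml_text (text : String) (out : String) : Prop := out = sanitize_yaml_text_alt text
instance (text : String) (out : String) : Decidable (Spec_sanitize_yaml_text text out) := by unfold Spec_sanitize_yaml_text; infer_instance

-- ===== CLAIM (what is proved, stated in full; the proofs are below) =====
def Claim_equal_sanitize_yaml_text : Prop := ∀ (text : String), Dom_sanitize_yaml_text text → Spec_sanitize_yaml_text text (sanitize_yaml_text text)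

-- ===== LEMMAS AND PROOFS =====

-- common reference filter: drop '...'-lines that have a later non-empty line
def sytNE (l : String) : Bool := !(PySem.Str.strip l == "")

def sytG : List String → List String
  | [] => []
  | l :: rest =>
      if PySem.Str.strip l == "..." && rest.any sytNE then sytG rest
      else l :: sytG rest

-- index (from 0) of the last non-empty line, -1 if none
def sytLast : List String → Int
  | [] => -1
  | l :: rest =>
      if sytLast rest ≥ 0 then sytLast rest + 1
      else if sytNE l then 0 else -1

theorem sytLast_nonneg_iff (ls : List String) : sytLast ls ≥ 0 ↔ ls.any sytNE = true := by
  induction ls with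
  | nil => simp [sytLast]
  | cons l rest ih =>
      simp only [sytLast, List.any_cons]
      split_ifs with h1 h2 <;> simp_all <;> omega

theorem sytLast_concat (ys : List String) (l : String) :
    sytLast (ys ++ [l]) = if sytNE l then (ys.length : Int) else sytLast ys := by
  induction ys with
  | nil => by_cases h : sytNE l = true <;> simp [sytLast, h]
  | cons y ys ih =>
      simp only [List.cons_append, sytLast, ih, List.length_cons]
      by_cases h : sytNE l = true
      · simp only [h, if_true]
        rw [if_pos (by positivity)]
        push_cast; ring
      · simp [h]

theorem sytFindLast_agree (ys : List String) (l : String) (idxs : List Int)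
    (hmem : ∀ i ∈ idxs, 0 ≤ i ∧ i < (ys.length : Int)) :
    sytFindLast (ys ++ [l]) idxs = sytFindLast ys idxs := by
  induction idxs with
  | nil => rfl
  | cons i rest ih =>
      obtain ⟨h0, h1⟩ := hmem i (by simp)
      have hget : PySem.List.pyGetD (ys ++ [l]) i "" = PySem.List.pyGetD ys i "" := by
        rw [PySem.List.pyGetD_eq_getElem _ _ h0 (by simpa using by omega),
            PySem.List.pyGetD_eq_getElem _ _ h0 (by simpa using h1)]
        rw [List.getElem_append_left (by omega)]
      simp only [sytFindLast, hget]
      rw [ih (fun j hj => hmem j (by simp [hj]))]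

theorem sytFindLast_eq (ls : List String) :
    sytFindLast ls (PySem.List.pyRange ((ls.length : Int) - 1) (-1) (-1)) = sytLast ls := by
  induction ls using List.reverseRecOn with
  | nil => simp [PySem.List.pyRange_neg_one_eq_nil, sytFindLast, sytLast]
  | append_singleton ys l ih =>
      have hlen : (((ys ++ [l]).length : Int)) - 1 = (ys.length : Int) := by simp
      rw [hlen, PySem.List.pyRange_neg_one_cons (by omega : (-1 : Int) < (ys.length : Int))]
      have hget : PySem.List.pyGetD (ys ++ [l]) (ys.length : Int) "" = l := by
        rw [PySem.List.pyGetD_eq_getElem _ _ (by positivity) (by simp)]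
        simp
      simp only [sytFindLast, hget]
      by_cases hne : PySem.Str.strip l = ""
      · have hne' : sytNE l = false := by simp [sytNE, hne]
        rw [if_neg (by simp [hne])]
        rw [sytFindLast_agree ys l _ (fun i hi => by
          rw [PySem.List.mem_pyRange_neg_one] at hi
          exact ⟨by omega, by omega⟩)]
        rw [ih, sytLast_concat, hne']
        simp
      · rw [if_pos (by simp [hne]), sytLast_concat]
        rw [if_pos (by simp [sytNE, hne])]

theorem sytFoldA_eq (ls : List String) (s L : Int) (acc : List String)
    (h : (L = s + sytLast ls ∧ sytLast ls ≥ 0) ∨ (L < s ∧ sytLast ls < 0)) :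
    (PySem.List.enumerate ls s).foldl
      (fun acc p =>
        if PySem.Str.strip p.2 == "..." && p.1 != L then acc
        else acc ++ [p.2]) acc = acc ++ sytG ls := by
  induction ls generalizing s acc with
  | nil => simp [sytG]
  | cons l rest ih =>
      rw [PySem.List.enumerate_cons, List.foldl_cons]
      by_cases hdot : (PySem.Str.strip l == "...") = true
      · have hl := eq_of_beq hdot
        have hne : sytNE l = true := by simp [sytNE, hl]
        have hlast : sytLast (l :: rest) = if sytLast rest ≥ 0 then sytLast rest + 1 else 0 := by
          by_cases h2 : sytLast rest ≥ 0 <;> simp [sytLast, h2, hne]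
        have hnn : sytLast (l :: rest) ≥ 0 := by rw [hlast]; split_ifs <;> omega
        obtain ⟨hEq, -⟩ : L = s + sytLast (l :: rest) ∧ sytLast (l :: rest) ≥ 0 := by
          rcases h with h | ⟨-, h3⟩
          · exact h
          · omega
        by_cases h2 : sytLast rest ≥ 0
        · have hany : rest.any sytNE = true := (sytLast_nonneg_iff rest).mp h2
          have hL : L = s + sytLast rest + 1 := by rw [hEq, hlast, if_pos h2]; ring
          have hsne : (s != L) = true := by simp [bne_iff_ne]; omega
          rw [if_pos (by simp [hdot, hsne])]
          rw [ih (s + 1) acc (Or.inl ⟨by omega, h2⟩)]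
          simp [sytG, hdot, hany]
        · have hany : ¬ rest.any sytNE = true := by
            rw [← sytLast_nonneg_iff]; omega
          have hL : L = s := by rw [hEq, hlast, if_neg h2]; ring
          rw [if_neg (by simp [hL])]
          rw [ih (s + 1) (acc ++ [l]) (Or.inr ⟨by omega, by omega⟩)]
          simp [sytG, hdot, hany]
      · rw [if_neg (by simp [hdot])]
        have hstep : (PySem.List.enumerate rest (s + 1)).foldl
            (fun acc p =>
              if PySem.Str.strip p.2 == "..." && p.1 != L then acc
              else acc ++ [p.2]) (acc ++ [l]) = (acc ++ [l]) ++ sytG rest := by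
          rcases h with ⟨hEq, hpos⟩ | ⟨hLs, hneg⟩
          · by_cases h2 : sytLast rest ≥ 0
            · refine ih (s + 1) (acc ++ [l]) (Or.inl ⟨?_, h2⟩)
              rw [hEq]
              by_cases hne : sytNE l = true <;> simp [sytLast, h2] <;> ring
            · have h0 : sytLast (l :: rest) = if sytNE l then 0 else -1 := by
                simp [sytLast, h2]
              have : sytLast (l :: rest) = 0 := by
                rw [h0]; rw [h0] at hpos; split_ifs at hpos ⊢ <;> omega
              exact ih (s + 1) (acc ++ [l]) (Or.inr ⟨by omega, by omega⟩)
          · have h2 : ¬ sytLast rest ≥ 0 := by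
              intro hge
              have : sytLast (l :: rest) ≥ 0 := by simp [sytLast, hge]; omega
              omega
            exact ih (s + 1) (acc ++ [l]) (Or.inr ⟨by omega, by omega⟩)
        rw [hstep]
        simp [sytG, hdot]

theorem sytFoldB_eq (ls : List String) :
    ls.reverse.foldl
      (fun (st : List String × Bool) line =>
        let stripped := PySem.Str.strip line
        let kept := if !(stripped == "..." && st.2) then st.1 ++ [line] else st.1
        (kept, st.2 || !(stripped == ""))) ([], false)
      = ((sytG ls).reverse, ls.any sytNE) := by
  induction ls with
  | nil => simp [sytG]
  | cons l rest ih =>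
      rw [List.reverse_cons, List.foldl_append, ih]
      simp only [List.foldl_cons, List.foldl_nil, sytG, List.any_cons]
      by_cases h : (PySem.Str.strip l == "...") = true
      · have hne : sytNE l = true := by
          have := eq_of_beq h
          simp [sytNE, this]
        have hl := eq_of_beq h
        by_cases h2 : rest.any sytNE = true
        · simp [h2, hne, hl]
        · simp [h2, hne, hl, Bool.or_comm]
      · simp [h, sytNE, Bool.or_comm]

-- ===== VERDICT (by name: the statement is the Claim_ definition above) =====
theorem sanitize_yaml_text_spec : Claim_equal_sanitize_yaml_text := by
  intro text _
  unfold Spec_sanitize_yaml_text sanitize_yaml_text sanitize_yaml_text_alt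
  simp only [sytFindLast_eq, sytFoldB_eq]
  rw [sytFoldA_eq (PySem.Str.splitlines text) 0 (sytLast (PySem.Str.splitlines text)) []]
  · simp
  · by_cases h : sytLast (PySem.Str.splitlines text) ≥ 0
    · exact Or.inl ⟨by omega, h⟩
    · exact Or.inr ⟨by omega, by omega⟩
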